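-- pv_equiv track=rewrite | github.com/marinicadenisandrei/leetcodePython | 110. Balanced Binary Tree/110. Balanced Binary Tree.py | depthBin
-- ===== SOURCE A (Python) =====
-- def depthBin(listVar):
--     lenVar = len(listVar)
--     power = 0
--
--     while lenVar > 1:
--         lenVar -= pow(2,power)
--         power += 1
--
--     if lenVar < 0:
--         lenVar = abs(lenVar)
--
--         for i in range(lenVar):
--             listVar.append(0)
--
--     return power
-- ===== SOURCE B (Python) =====
-- def depthBin(listVar):
--     n = len(listVar)
--     power = 0 if n <= 1 else (n - 1).bit_length()
--     target = (1 << power) - 1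
--     if target > n:
--         listVar.extend([0] * (target - n))
--     return power
-- ===== Notes on version B (the rewrite author's own statement) =====
-- stated objective: simpler
-- what changed: Replaces the subtract-successive-powers-of-two while-loop with a closed-form bit_length computation of the power and a single extend for the zero padding.
import Mathlib
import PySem

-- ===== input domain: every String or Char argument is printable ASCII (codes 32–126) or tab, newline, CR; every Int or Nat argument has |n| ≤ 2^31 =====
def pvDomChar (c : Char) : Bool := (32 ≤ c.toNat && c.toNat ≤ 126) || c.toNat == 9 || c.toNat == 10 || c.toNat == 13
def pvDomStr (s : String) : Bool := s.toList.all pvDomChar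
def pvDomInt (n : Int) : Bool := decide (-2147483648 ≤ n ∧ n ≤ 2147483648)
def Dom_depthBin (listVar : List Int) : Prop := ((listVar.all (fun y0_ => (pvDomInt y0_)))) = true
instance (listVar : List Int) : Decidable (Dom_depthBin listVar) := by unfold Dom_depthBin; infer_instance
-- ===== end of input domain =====

-- B computes the power in closed form via bit_length instead of A's subtract-successive-powers-of-two
-- loop (objective: simpler). Both Pythons also pad the argument list with zeros in place identically;
-- the equivalence proved here is about the RETURN value only.

-- ===== PORT A =====
-- A's while-loop: state (lenVar, power); power is a Python int that starts at 0 and only increments,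
-- so it is carried as a Nat (pow(2,power) = 2^p); the final padding for-loop only mutates the list
-- argument and never affects the returned power, so the port returns the loop's final power.
def depthBinLoopA (lenVar : Int) (power : Nat) : Int :=
  if 1 < lenVar then depthBinLoopA (lenVar - 2 ^ power) (power + 1) else (power : Int)
termination_by lenVar.toNat
decreasing_by
  have h1 : (1:Int) ≤ 2 ^ power := one_le_pow₀ (by norm_num)
  omega

def depthBin (listVar : List Int) : Int :=
  depthBinLoopA (listVar.length : Int) 0

-- ===== PORT B =====
-- (n-1).bit_length() for n ≥ 2 is Nat.size (n-1); the extend of zeros only mutates the argument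
-- and does not affect the returned power.
def depthBin_alt (listVar : List Int) : Int :=
  let n := listVar.length
  if n ≤ 1 then 0 else ((n - 1).size : Int)

-- ===== PRECONDITION & SPEC =====
def Spec_depthBin (listVar : List Int) (out : Int) : Prop := out = depthBin_alt listVar
instance (listVar : List Int) (out : Int) : Decidable (Spec_depthBin listVar out) := by unfold Spec_depthBin; infer_instance

-- ===== CLAIM (what is proved, stated in full; the proofs are below) =====
def Claim_equal_depthBin : Prop := ∀ (listVar : List Int), Dom_depthBin listVar → Spec_depthBin listVar (depthBin listVar)

-- ===== LEMMAS AND PROOFS =====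

-- Invariant: starting the loop at power p with lenVar = t - 2^p + 1, if 2^(p+m-1) < t ≤ 2^(p+m)
-- then the loop stops after exactly m iterations with power p + m.
theorem depthBinLoopA_key : ∀ (m p : Nat) (t : Int),
    (2:Int) ^ (p + m - 1) < t → t ≤ 2 ^ (p + m) →
    depthBinLoopA (t - 2 ^ p + 1) p = ((p : Int) + m) := by
  intro m
  induction m with
  | zero =>
      intro p t hlo hhi
      unfold depthBinLoopA
      have : ¬ (1 < t - 2 ^ p + 1) := by
        simp only [Nat.add_zero] at hhi; omega
      simp [this]
  | succ k ih =>
      intro p t hlo hhi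
      unfold depthBinLoopA
      have hpk : (2:Int) ^ p ≤ 2 ^ (p + (k + 1) - 1) := by
        apply pow_le_pow_right₀ (by norm_num)
        omega
      have hstep : 1 < t - 2 ^ p + 1 := by omega
      simp only [hstep, if_pos]
      have harg : t - 2 ^ p + 1 - 2 ^ p = t - 2 ^ (p + 1) + 1 := by
        have : (2:Int) ^ (p + 1) = 2 ^ p * 2 := pow_succ 2 p
        omega
      rw [harg, ih (p + 1) t (by rw [show p + 1 + k - 1 = p + (k + 1) - 1 by omega]; exact hlo)
            (by rw [show p + 1 + k = p + (k + 1) by omega]; exact hhi)]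
      push_cast; ring

-- ===== VERDICT (by name: the statement is the Claim_ definition above) =====
theorem depthBin_spec : Claim_equal_depthBin := by
  intro listVar _
  unfold Spec_depthBin depthBin depthBin_alt
  set n := listVar.length with hn
  by_cases h1 : n ≤ 1
  · have : ¬ (1 < (n : Int)) := by omega
    unfold depthBinLoopA
    simp [this, h1]
  · -- n ≥ 2: apply the key lemma with t = n, p = 0, m = (n-1).size
    rw [not_le] at h1
    have hpos : 1 ≤ n - 1 := by omega
    have hs1 : 0 < (n - 1).size := Nat.lt_size.mpr (by simpa using hpos)
    have hhi : (n : Int) ≤ 2 ^ (0 + (n - 1).size) := by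
      have hN := Nat.lt_size_self (n - 1)
      have hc : ((n - 1 : Nat) : Int) < (2:Int) ^ (n - 1).size := by exact_mod_cast hN
      simp only [Nat.zero_add]
      omega
    have hlo : (2:Int) ^ (0 + (n - 1).size - 1) < (n : Int) := by
      have h2 : 2 ^ ((n - 1).size - 1) ≤ n - 1 := Nat.lt_size.mp (by omega)
      have hc : (2:Int) ^ ((n - 1).size - 1) ≤ ((n - 1 : Nat) : Int) := by exact_mod_cast h2
      simp only [Nat.zero_add]
      omega
    have := depthBinLoopA_key ((n - 1).size) 0 (n : Int) hlo hhi
    have harg : (n : Int) - 2 ^ (0:Nat) + 1 = (n : Int) := by norm_num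
    rw [harg] at this
    rw [this]
    simp [not_le.mpr h1]
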